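-- pv_equiv track=rewrite | github.com/mukhtar-github/taxpoynt-platform | platform/backend/external_integrations/business_systems/pos/clover/rest_client.py | _apply_client_side_filters
-- ===== SOURCE A (Python) =====
-- from typing import Any, Dict, List, Optional, Union
--
-- def _apply_client_side_filters(orders: List[Dict], filters: Dict[str, Any]) -> List[Dict]:
--     """Apply filters that cannot be done server-side."""
--     filtered_orders = orders
--
--     # Amount filtering (Clover amounts are in cents)
--     if filters.get('min_amount') is not None:
--         min_amount = int(filters['min_amount'])  # Convert to cents if needed
--         filtered_orders = [
--             order for order in filtered_orders
--             if order.get('total', 0) >= min_amount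
--         ]
--
--     if filters.get('max_amount') is not None:
--         max_amount = int(filters['max_amount'])  # Convert to cents if needed
--         filtered_orders = [
--             order for order in filtered_orders
--             if order.get('total', 0) <= max_amount
--         ]
--
--     return filtered_orders
-- ===== SOURCE B (Python) =====
-- def _apply_client_side_filters(orders, filters):
--     """Apply filters that cannot be done server-side."""
--     lo = filters.get('min_amount')
--     hi = filters.get('max_amount')
--     if lo is not None:
--         lo = int(lo)
--     if hi is not None:
--         hi = int(hi)
--     return [
--         order for order in orders
--         if (lo is None or order.get('total', 0) >= lo)
--         and (hi is None or order.get('total', 0) <= hi)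
--     ]
-- ===== Notes on version B (the rewrite author's own statement) =====
-- stated objective: simpler
-- what changed: Resolves both bounds once up front and replaces A's two sequential list-rebuilding filter passes with a single comprehension using a combined predicate.
import Mathlib
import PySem

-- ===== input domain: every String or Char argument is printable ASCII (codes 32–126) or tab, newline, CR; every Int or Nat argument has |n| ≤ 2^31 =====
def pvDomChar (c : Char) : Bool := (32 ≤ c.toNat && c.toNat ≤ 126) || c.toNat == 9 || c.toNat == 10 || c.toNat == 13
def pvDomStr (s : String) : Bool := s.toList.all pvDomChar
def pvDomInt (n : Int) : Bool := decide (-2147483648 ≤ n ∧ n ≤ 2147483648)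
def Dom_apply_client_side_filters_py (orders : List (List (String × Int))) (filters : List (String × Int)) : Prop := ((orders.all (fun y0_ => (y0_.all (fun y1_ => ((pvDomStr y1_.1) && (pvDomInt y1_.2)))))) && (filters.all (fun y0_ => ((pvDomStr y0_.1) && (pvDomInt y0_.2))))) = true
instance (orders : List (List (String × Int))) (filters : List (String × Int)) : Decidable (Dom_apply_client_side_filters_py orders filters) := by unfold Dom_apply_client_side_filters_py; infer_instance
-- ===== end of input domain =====

-- B resolves both bounds once and filters in a single pass with a combined predicate (objective: simpler).
-- ===== PORT A =====
-- A: start from all orders, then apply the min_amount filter pass, then the max_amount filter pass.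
def apply_client_side_filters_py (orders : List (List (String × Int))) (filters : List (String × Int)) : List (List (String × Int)) :=
  let filtered_orders := orders
  let filtered_orders :=
    match PySem.Dict.get? (PySem.Dict.mk filters) "min_amount" with
    | some min_amount => filtered_orders.filter (fun order => PySem.Dict.getD (PySem.Dict.mk order) "total" 0 ≥ min_amount)
    | none => filtered_orders
  let filtered_orders :=
    match PySem.Dict.get? (PySem.Dict.mk filters) "max_amount" with
    | some max_amount => filtered_orders.filter (fun order => PySem.Dict.getD (PySem.Dict.mk order) "total" 0 ≤ max_amount)
    | none => filtered_orders
  filtered_orders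

-- ===== PORT B =====
-- B: look up both bounds once, then one filter over orders with the combined predicate.
def apply_client_side_filters_py_alt (orders : List (List (String × Int))) (filters : List (String × Int)) : List (List (String × Int)) :=
  let lo := PySem.Dict.get? (PySem.Dict.mk filters) "min_amount"
  let hi := PySem.Dict.get? (PySem.Dict.mk filters) "max_amount"
  orders.filter (fun order =>
    (match lo with | none => true | some m => decide (PySem.Dict.getD (PySem.Dict.mk order) "total" 0 ≥ m)) &&
    (match hi with | none => true | some m => decide (PySem.Dict.getD (PySem.Dict.mk order) "total" 0 ≤ m)))

-- ===== PRECONDITION & SPEC =====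
def Spec_apply_client_side_filters_py (orders : List (List (String × Int))) (filters : List (String × Int)) (out : List (List (String × Int))) : Prop := out = apply_client_side_filters_py_alt orders filters
instance (orders : List (List (String × Int))) (filters : List (String × Int)) (out : List (List (String × Int))) : Decidable (Spec_apply_client_side_filters_py orders filters out) := by unfold Spec_apply_client_side_filters_py; infer_instance

-- ===== CLAIM (what is proved, stated in full; the proofs are below) =====
def Claim_equal_apply_client_side_filters_py : Prop := ∀ (orders : List (List (String × Int))) (filters : List (String × Int)), Dom_apply_client_side_filters_py orders filters → Spec_apply_client_side_filters_py orders filters (apply_client_side_filters_py orders filters)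

-- ===== LEMMAS AND PROOFS =====

-- ===== VERDICT (by name: the statement is the Claim_ definition above) =====
theorem apply_client_side_filters_py_spec : Claim_equal_apply_client_side_filters_py := by
  intro orders filters _
  unfold Spec_apply_client_side_filters_py apply_client_side_filters_py apply_client_side_filters_py_alt
  cases PySem.Dict.get? (PySem.Dict.mk filters) "min_amount" <;> cases PySem.Dict.get? (PySem.Dict.mk filters) "max_amount" <;>
    simp [List.filter_filter, Bool.and_comm]
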